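-- pv_equiv track=rewrite | github.com/aurastejeroiu/FP | A11-12/main.py | go_forward
-- ===== SOURCE A (Python) =====
-- def go_forward(list):
--     number_of_elements = len(list)
--     ok = 1
--     if number_of_elements != 2:
--         for i in range(1, number_of_elements - 1):
--             if list[i] != list[i + 1] - 1:
--                 ok = 0
--             if ok == 0:
--                 return False
--     return True
-- ===== SOURCE B (Python) =====
-- def go_forward(list):
--     sub = list[1:]
--     if not sub:
--         return True
--     expected = [sub[0] + k for k in range(len(sub))]
--     return sub == expected
-- ===== Notes on version B (the rewrite author's own statement) =====
-- stated objective: simpler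
-- what changed: Replaces A's indexed pairwise adjacent-difference scan with early return by slicing off the head and comparing the sublist to the explicitly built expected consecutive run.
import Mathlib
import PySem

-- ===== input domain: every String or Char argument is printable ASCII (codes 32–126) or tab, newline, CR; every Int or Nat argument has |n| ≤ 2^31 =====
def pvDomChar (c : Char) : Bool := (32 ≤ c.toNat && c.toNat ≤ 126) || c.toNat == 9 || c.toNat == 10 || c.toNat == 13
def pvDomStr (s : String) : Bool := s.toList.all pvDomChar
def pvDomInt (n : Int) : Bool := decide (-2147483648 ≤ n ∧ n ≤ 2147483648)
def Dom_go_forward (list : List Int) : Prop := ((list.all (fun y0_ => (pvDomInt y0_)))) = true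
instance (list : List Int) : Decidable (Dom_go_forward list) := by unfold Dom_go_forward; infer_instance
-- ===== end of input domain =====

-- B replaces A's pairwise adjacent-difference scan by building the expected consecutive
-- run from list[1:] and comparing for equality (objective: simpler).

-- ===== PORT A =====
-- the for-loop with its early 'return False'; the index accesses are always in range,
-- so the unreachable IndexError arm returns false
def go_forward_loop (list : List Int) : List Int → Bool
  | [] => true
  | i :: rest =>
    match PySem.List.pyGet? list i, PySem.List.pyGet? list (i + 1) with
    | some a, some b => if a ≠ b - 1 then false else go_forward_loop list rest
    | _, _ => false

def go_forward (list : List Int) : Bool :=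
  if (list.length : Int) ≠ 2 then
    go_forward_loop list (PySem.List.pyRange 1 ((list.length : Int) - 1) 1)
  else true

-- ===== PORT B =====
def go_forward_alt (list : List Int) : Bool :=
  let sub := PySem.List.slice list (some 1) none
  if sub.isEmpty then true
  else
    let expected := (PySem.List.pyRange 0 (sub.length : Int) 1).map
      (fun k => PySem.List.pyGetD sub 0 0 + k)
    decide (sub = expected)

-- ===== PRECONDITION & SPEC =====
def Spec_go_forward (list : List Int) (out : Bool) : Prop := out = go_forward_alt list
instance (list : List Int) (out : Bool) : Decidable (Spec_go_forward list out) := by unfold Spec_go_forward; infer_instance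

-- ===== CLAIM (what is proved, stated in full; the proofs are below) =====
def Claim_equal_go_forward : Prop := ∀ (list : List Int), Dom_go_forward list → Spec_go_forward list (go_forward list)

-- ===== LEMMAS AND PROOFS =====

-- common characterisation: the tail of the input is a consecutive increasing run
def chainB : List Int → Bool
  | a :: b :: t => (b == a + 1) && chainB (b :: t)
  | _ => true

lemma chainB_nil : chainB [] = true := rfl
lemma chainB_single (a : Int) : chainB [a] = true := rfl
lemma chainB_cons2 (a b : Int) (t : List Int) :
    chainB (a :: b :: t) = ((b == a + 1) && chainB (b :: t)) := rfl

-- the consecutive run of given length starting at a given base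
def buildRun : Int → Nat → List Int
  | _, 0 => []
  | a, n + 1 => a :: buildRun (a + 1) n

lemma range_map_eq_buildRun : ∀ (n : Nat) (a : Int),
    (List.range n).map (fun k : Nat => a + (k : Int)) = buildRun a n := by
  intro n
  induction n with
  | zero => intro a; simp [buildRun]
  | succ m ih =>
    intro a
    rw [List.range_succ_eq_map, List.map_cons, List.map_map, buildRun]
    congr 1
    · simp
    · rw [← ih (a + 1)]
      apply List.map_congr_left
      intro k _
      simp only [Function.comp_apply]
      push_cast
      ring

lemma chain_iff_run : ∀ (t : List Int) (a : Int),
    (t = buildRun (a + 1) t.length) ↔ chainB (a :: t) = true := by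
  intro t
  induction t with
  | nil => intro a; simp [buildRun, chainB_single]
  | cons b t' ih =>
    intro a
    rw [List.length_cons, buildRun, chainB_cons2]
    constructor
    · intro h
      injection h with hb ht
      have hc := (ih b).mp (by rw [hb]; exact ht)
      rw [hb] at hc
      simp [hb, hc]
    · intro h
      rw [Bool.and_eq_true] at h
      have hb : b = a + 1 := by simpa using h.1
      have ht := (ih b).mpr h.2
      subst hb
      conv_lhs => rw [ht]

lemma loop_eq_chain : ∀ (sub pre : List Int) (a b : Int),
    a = (pre.length : Int) → b = a + (sub.length : Int) - 1 →
    go_forward_loop (pre ++ sub) (PySem.List.pyRange a b 1) = chainB sub := by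
  intro sub
  induction sub with
  | nil =>
    intro pre a b ha hb
    have h0 : (b - a).toNat = 0 := by simp only [List.length_nil] at hb; omega
    rw [PySem.List.pyRange_one, h0]
    simp [go_forward_loop, chainB_nil]
  | cons x t ih =>
    intro pre a b ha hb
    cases t with
    | nil =>
      have h0 : (b - a).toNat = 0 := by
        simp only [List.length_cons, List.length_nil] at hb; omega
      rw [PySem.List.pyRange_one, h0]
      simp [go_forward_loop, chainB_single]
    | cons y t' =>
      subst hb
      subst ha
      have hlt : (pre.length : Int) <
          (pre.length : Int) + ((x :: y :: t').length : Int) - 1 := by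
        simp only [List.length_cons]; omega
      rw [PySem.List.pyRange_one_cons hlt]
      have h1 : PySem.List.pyGet? (pre ++ x :: y :: t') (pre.length : Int) = some x := by
        simpa using PySem.List.pyGet?_append_right pre (x :: y :: t') 0
      have h2 : PySem.List.pyGet? (pre ++ x :: y :: t') ((pre.length : Int) + 1) = some y := by
        simpa using PySem.List.pyGet?_append_right pre (x :: y :: t') 1
      simp only [go_forward_loop, h1, h2]
      by_cases hxy : x ≠ y - 1
      · rw [if_pos hxy, chainB_cons2]
        have hb : (y == x + 1) = false := by simp; omega
        simp [hb]
      · rw [if_neg hxy]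
        have hb : y = x + 1 := by omega
        have harr : pre ++ x :: y :: t' = (pre ++ [x]) ++ y :: t' := by simp
        have key := ih (pre ++ [x]) ((pre.length : Int) + 1)
            ((pre.length : Int) + ((x :: y :: t').length : Int) - 1)
            (by simp only [List.length_append, List.length_cons, List.length_nil]; push_cast; ring)
            (by simp only [List.length_cons]; push_cast; ring)
        rw [harr, key, chainB_cons2]
        simp [hb]

lemma go_forward_eq_chain (list : List Int) : go_forward list = chainB (list.drop 1) := by
  simp only [go_forward]
  by_cases h2 : (list.length : Int) = 2
  · rw [if_neg (not_not.mpr h2)]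
    cases list with
    | nil => simp at h2
    | cons x rest =>
      cases rest with
      | nil => simp at h2
      | cons y t =>
        have ht : t = [] := by
          have h0 : t.length = 0 := by simp at h2; omega
          exact List.length_eq_zero_iff.mp h0
        subst ht
        simp [chainB_single]
  · rw [if_pos h2]
    cases list with
    | nil => decide
    | cons x rest =>
      have key := loop_eq_chain rest [x] 1 (((x :: rest).length : Int) - 1)
          (by simp)
          (by simp only [List.length_cons]; push_cast; ring)
      simpa using key

lemma go_forward_alt_eq_chain (list : List Int) :
    go_forward_alt list = chainB (list.drop 1) := by
  simp only [go_forward_alt, PySem.List.slice_from_one, ← List.drop_one]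
  cases h : list.drop 1 with
  | nil => simp [chainB_nil]
  | cons a t =>
    simp only [List.isEmpty_cons, Bool.false_eq_true, if_false]
    have hexp :
        (PySem.List.pyRange 0 (((a :: t).length : Nat) : Int) 1).map
            (fun k => PySem.List.pyGetD (a :: t) 0 0 + k)
          = a :: buildRun (a + 1) t.length := by
      rw [PySem.List.pyRange_one, List.map_map]
      have h0 : ((((a :: t).length : Nat) : Int) - 0).toNat = t.length + 1 := by simp
      rw [h0]
      have hfun : ((fun k => PySem.List.pyGetD (a :: t) 0 0 + k) ∘ fun k : Nat => 0 + (k : Int))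
          = (fun k : Nat => a + (k : Int)) := by
        funext k
        simp [PySem.List.pyGetD_zero_cons]
      rw [hfun, range_map_eq_buildRun, buildRun]
    rw [hexp]
    cases hc : chainB (a :: t) with
    | false =>
      refine decide_eq_false ?_
      intro hEq
      injection hEq with _ hTl
      have := (chain_iff_run t a).mp hTl
      rw [hc] at this
      exact Bool.false_ne_true this
    | true =>
      have ht := (chain_iff_run t a).mpr hc
      rw [← ht]
      simp

-- ===== VERDICT (by name: the statement is the Claim_ definition above) =====
theorem go_forward_spec : Claim_equal_go_forward := by
  intro list _
  unfold Spec_go_forward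
  rw [go_forward_eq_chain, go_forward_alt_eq_chain]
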